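-- pv_equiv track=rewrite | github.com/miliar/Code_Jam_Webscraper | solutions_python/Problem_181/1791.py | solve
-- ===== SOURCE A (Python) =====
-- def solve(s):
--     ans = [s[0]]
--     for ch in s[1:]:
--         if ord(ch) >= ord(ans[0]):
--             ans.insert(0, ch)
--         else:
--             ans.append(ch)
--     return ''.join(ans)
-- ===== SOURCE B (Python) =====
-- def solve(s):
--     # staged: prefix-max table, then two filter passes, then reverse + concatenate
--     pm = []
--     m = 0
--     for ch in s[:-1]:
--         m = max(m, ord(ch))
--         pm.append(m)
--     front = [ch for ch, p in zip(s[1:], pm) if ord(ch) >= p]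
--     back = [ch for ch, p in zip(s[1:], pm) if ord(ch) < p]
--     front.reverse()
--     return ''.join(front) + s[0] + ''.join(back)
-- ===== Notes on version B (the rewrite author's own statement) =====
-- stated objective: faster
-- what changed: Replaces A's single list mutated in place by insert(0)/append with comparison against the mutating list's head, by staged passes: build a prefix-maximum table over s[:-1], then filter s[1:] against that table into record/non-record lists, reverse the record list and concatenate around s[0].
import Mathlib
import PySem

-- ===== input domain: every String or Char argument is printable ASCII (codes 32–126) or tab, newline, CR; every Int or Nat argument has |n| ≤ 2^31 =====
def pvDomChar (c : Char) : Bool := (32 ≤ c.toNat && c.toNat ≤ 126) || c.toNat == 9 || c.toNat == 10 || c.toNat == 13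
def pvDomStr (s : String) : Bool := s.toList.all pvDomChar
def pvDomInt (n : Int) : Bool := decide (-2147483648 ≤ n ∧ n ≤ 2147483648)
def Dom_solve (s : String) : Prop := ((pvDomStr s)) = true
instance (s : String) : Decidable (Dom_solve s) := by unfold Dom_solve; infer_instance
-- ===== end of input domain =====

-- B is a faster staged re-implementation: prefix-maximum table over s[:-1], two filters of
-- s[1:] against it, reverse + concatenate around s[0]; avoids A's O(n) insert(0) per record.

-- ===== PORT A =====
-- ans mutated by insert(0, ch) or append(ch); comparison key read from ans[0] each step
def solve (s : String) : String :=
  match s.toList with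
  | [] => ""  -- unreachable under Pre_solve (Python raises IndexError on s[0])
  | c :: rest =>
    String.mk (rest.foldl
      (fun ans ch => if (ans.headD ' ').toNat ≤ ch.toNat then ch :: ans else ans ++ [ch])
      [c])

-- ===== PORT B =====
-- pm = prefix maxima of ord over s[:-1]; front/back = filters of zip(s[1:], pm); result
-- = reversed front ++ s[0] ++ back
def solve_alt (s : String) : String :=
  match s.toList with
  | [] => ""  -- unreachable under Pre_solve (Python raises IndexError on s[0])
  | c :: rest =>
    let pm := ((c :: rest).dropLast.foldl
        (fun (st : Nat × List Nat) ch =>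
          let m := max st.1 ch.toNat
          (m, st.2 ++ [m])) (0, [])).2
    let front := ((rest.zip pm).filter (fun p => decide (p.2 ≤ p.1.toNat))).map Prod.fst
    let back := ((rest.zip pm).filter (fun p => decide (p.1.toNat < p.2))).map Prod.fst
    String.mk (front.reverse ++ c :: back)

-- ===== PRECONDITION & SPEC =====
-- Pre_ excludes only the empty string, on which the Python A (and B) raise IndexError at s[0].
def Pre_solve (s : String) : Prop := s ≠ ""
instance (s : String) : Decidable (Pre_solve s) := by unfold Pre_solve; infer_instance
def pvWitness_solve : String := "ba"
def Spec_solve (s : String) (out : String) : Prop := out = solve_alt s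
instance (s : String) (out : String) : Decidable (Spec_solve s out) := by unfold Spec_solve; infer_instance

-- ===== CLAIM (what is proved, stated in full; the proofs are below) =====
def Claim_equal_solve : Prop := ∀ (s : String), Dom_solve s → Pre_solve s → Spec_solve s (solve s)

-- ===== LEMMAS AND PROOFS =====

-- exclusive prefix maxima: entry i is the running max BEFORE element i, seeded with m
def pmE (m : Nat) : List Char → List Nat
  | [] => []
  | ch :: t => m :: pmE (max m ch.toNat) t

-- inclusive prefix maxima (what B's first pass computes, up to the accumulator)
def pmL (m : Nat) : List Char → List Nat
  | [] => []
  | ch :: t => max m ch.toNat :: pmL (max m ch.toNat) t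

lemma pm_foldl (l : List Char) (m : Nat) (acc : List Nat) :
    (l.foldl (fun (st : Nat × List Nat) ch =>
        let m := max st.1 ch.toNat
        (m, st.2 ++ [m])) (m, acc)).2 = acc ++ pmL m l := by
  induction l generalizing m acc with
  | nil => simp [pmL]
  | cons ch t ih => simp [pmL, ih]

lemma pmE_eq (l : List Char) (m : Nat) (h : l ≠ []) :
    m :: pmL m l.dropLast = pmE m l := by
  induction l generalizing m with
  | nil => exact absurd rfl h
  | cons ch t ih =>
    cases t with
    | nil => simp [pmL, pmE]
    | cons d t' =>
      simp only [List.dropLast_cons₂, pmL, pmE]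
      exact congrArg _ (ih (max m ch.toNat) (by simp))

lemma loop_eq (l : List Char) (m : Nat) (F B : List Char) (c : Char)
    (h : ((F.reverse ++ c :: B).headD ' ').toNat = m) :
    l.foldl (fun ans ch => if (ans.headD ' ').toNat ≤ ch.toNat then ch :: ans else ans ++ [ch])
      (F.reverse ++ c :: B)
    = (F ++ ((l.zip (pmE m l)).filter (fun p => decide (p.2 ≤ p.1.toNat))).map Prod.fst).reverse
      ++ c :: (B ++ ((l.zip (pmE m l)).filter (fun p => decide (p.1.toNat < p.2))).map Prod.fst) := by
  induction l generalizing m F B with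
  | nil => simp
  | cons ch t ih =>
    simp only [pmE, List.zip_cons_cons, List.foldl_cons, List.filter_cons, h]
    by_cases hm : m ≤ ch.toNat
    · rw [if_pos hm]
      have h1 : ch :: (F.reverse ++ c :: B) = (F ++ [ch]).reverse ++ c :: B := by simp
      have h2 : max m ch.toNat = ch.toNat := by omega
      rw [h1, ih (max m ch.toNat) (F ++ [ch]) B (by simp [h2])]
      simp [hm, Nat.not_lt.2 hm]
    · rw [if_neg hm]
      have h2 : max m ch.toNat = m := by omega
      rw [show (F.reverse ++ c :: B) ++ [ch] = F.reverse ++ c :: (B ++ [ch]) by simp,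
        ih (max m ch.toNat) F (B ++ [ch]) (by simpa [h2] using h)]
      simp [hm, Nat.lt_of_not_le hm]

-- ===== VERDICT (by name: the statement is the Claim_ definition above) =====
theorem solve_spec : Claim_equal_solve := by
  intro s _ _
  unfold Spec_solve solve solve_alt
  cases hs : s.toList with
  | nil => rfl
  | cons c rest =>
    dsimp only
    rw [pm_foldl, List.nil_append]
    have hpm : pmL 0 ((c :: rest).dropLast) = pmE c.toNat rest := by
      cases rest with
      | nil => simp [pmL, pmE]
      | cons d t =>
        rw [List.dropLast_cons₂]
        simp only [pmL, Nat.zero_max]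
        exact pmE_eq (d :: t) c.toNat (by simp)
    rw [hpm]
    have := loop_eq rest c.toNat [] [] c (by simp)
    simp only [List.reverse_nil, List.nil_append] at this
    rw [this]
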